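-- pv_equiv track=rewrite | github.com/Moon-ju-young/2023_TGwinG_FE_MoonJuyoung | MoonJuyoung_4week_assignment.py | beerRefrigerator
-- ===== SOURCE A (Python) =====
-- def beerRefrigerator(n):
--
--     li=[]
--     for i in range(1,n//2):
--         temp = n//i
--         if n%i == 0:
--             for j in range(i,temp):
--                 if temp%j == 0:
--                     li.append([temp//j,j,i])
--
--     surface = (lambda l: l[0]*l[1] + l[1]*l[2] + l[2]*l[0])
--     best = min(li, key=surface)
--     best.sort()
--     best.reverse()
--
--     return f"{best[0]} X {best[1]} X {best[2]}"
-- ===== SOURCE B (Python) =====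
-- def beerRefrigerator(n):
--     # Build the sorted divisor list once (divisors relevant as i or j are all <= n//2),
--     # then scan divisor pairs in the same (i, j) order, keeping the first minimal surface.
--     half = n // 2
--     divs = [d for d in range(1, half + 1) if n % d == 0]
--     best = None
--     best_s = None
--     for i in divs:
--         if i >= half:
--             break
--         temp = n // i
--         for j in divs:
--             if j < i:
--                 continue
--             if j >= temp:
--                 break
--             if temp % j == 0:
--                 a = temp // j
--                 s = a * j + j * i + i * a
--                 if best_s is None or s < best_s:
--                     best, best_s = (a, j, i), s
--     x, y, z = sorted(best, reverse=True)
--     return f"{x} X {y} X {z}"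
-- ===== Notes on version B (the rewrite author's own statement) =====
-- stated objective: faster
-- what changed: B builds the sorted divisor list of n once (one comprehension up to n//2) and scans divisor pairs in A's (i, j) order with a running minimum, instead of A's trial division over every i in range(1, n//2) plus an inner scan over every j in range(i, n//i), and without materialising the candidate list.
import Mathlib
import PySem

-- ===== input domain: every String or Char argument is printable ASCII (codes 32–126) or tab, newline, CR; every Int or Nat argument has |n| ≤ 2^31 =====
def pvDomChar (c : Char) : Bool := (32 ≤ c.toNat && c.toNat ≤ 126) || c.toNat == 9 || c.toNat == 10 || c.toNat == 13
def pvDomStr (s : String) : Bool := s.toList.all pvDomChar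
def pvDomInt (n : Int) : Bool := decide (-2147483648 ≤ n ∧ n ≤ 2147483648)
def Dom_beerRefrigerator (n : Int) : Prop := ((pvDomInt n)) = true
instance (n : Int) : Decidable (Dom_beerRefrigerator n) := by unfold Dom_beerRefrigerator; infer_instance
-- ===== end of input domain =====

-- B builds the (sorted) divisor list of n once and scans divisor pairs in A's (i, j) order,
-- tracking the first minimal surface, instead of A's trial division over every i < n//2 and every j < n//i.

-- ===== PORT A =====

-- surface(l) = l[0]*l[1] + l[1]*l[2] + l[2]*l[0]
def pvSurf (t : Int × Int × Int) : Int := t.1 * t.2.1 + t.2.1 * t.2.2 + t.2.2 * t.1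

-- f"{x} X {y} X {z}"
def pvFmt (x y z : Int) : String :=
  PySem.Int.toStr x ++ " X " ++ PySem.Int.toStr y ++ " X " ++ PySem.Int.toStr z

def beerRefrigerator (n : Int) : String :=
  let li : List (Int × Int × Int) :=
    (PySem.List.pyRange 1 (PySem.Int.floordiv n 2)).foldl (fun li i =>
      let temp := PySem.Int.floordiv n i
      if PySem.Int.mod n i == 0 then
        (PySem.List.pyRange i temp).foldl (fun li j =>
          if PySem.Int.mod temp j == 0 then li ++ [(PySem.Int.floordiv temp j, j, i)] else li) li
      else li) []
  match PySem.List.min? li pvSurf with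
  | none => ""   -- Python: min([]) raises ValueError; excluded by Pre_
  | some best =>
      -- best.sort(); best.reverse()
      let b := (PySem.List.sorted [best.1, best.2.1, best.2.2] (fun x => x)).reverse
      -- best[0], best[1], best[2] of the 3-element list (indices always in range)
      pvFmt (PySem.List.pyGetD b 0 0) (PySem.List.pyGetD b 1 0) (PySem.List.pyGetD b 2 0)

-- ===== PORT B =====

-- if best_s is None or s < best_s: best, best_s = (a, j, i), s
def pvUpdateB (st : Option ((Int × Int × Int) × Int)) (a j i s : Int) :
    Option ((Int × Int × Int) × Int) :=
  match st with
  | none => some ((a, j, i), s)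
  | some (c0, s0) => if s < s0 then some ((a, j, i), s) else some (c0, s0)

-- for j in divs: if j < i: continue; if j >= temp: break; ...
def pvInnerB (i temp : Int) (js : List Int) (st : Option ((Int × Int × Int) × Int)) :
    Option ((Int × Int × Int) × Int) :=
  match js with
  | [] => st
  | j :: rest =>
    if j < i then pvInnerB i temp rest st
    else if temp ≤ j then st
    else if PySem.Int.mod temp j == 0 then
      let a := PySem.Int.floordiv temp j
      pvInnerB i temp rest (pvUpdateB st a j i (a * j + j * i + i * a))
    else pvInnerB i temp rest st

-- for i in divs: if i >= half: break; ...
def pvOuterB (n half : Int) (divs : List Int) (is : List Int)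
    (st : Option ((Int × Int × Int) × Int)) : Option ((Int × Int × Int) × Int) :=
  match is with
  | [] => st
  | i :: rest =>
    if half ≤ i then st
    else pvOuterB n half divs rest (pvInnerB i (PySem.Int.floordiv n i) divs st)

def beerRefrigerator_alt (n : Int) : String :=
  let half := PySem.Int.floordiv n 2
  let divs := (PySem.List.pyRange 1 (half + 1)).filter (fun d => PySem.Int.mod n d == 0)
  match pvOuterB n half divs divs none with
  | none => ""   -- Python: best is None, unpacking raises TypeError; excluded by Pre_
  | some (c, _) =>
      match PySem.List.sorted [c.1, c.2.1, c.2.2] (fun x => x) true with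
      | [x, y, z] => pvFmt x y z
      | _ => ""   -- unreachable: sorted of a 3-element list has 3 elements

-- ===== PRECONDITION & SPEC =====
-- Pre_ excludes exactly n < 4, where A's candidate list is empty and min([]) raises ValueError.
def Pre_beerRefrigerator (n : Int) : Prop := 4 ≤ n
instance (n : Int) : Decidable (Pre_beerRefrigerator n) := by unfold Pre_beerRefrigerator; infer_instance
def pvWitness_beerRefrigerator : Int := (4)

def Spec_beerRefrigerator (n : Int) (out : String) : Prop := out = beerRefrigerator_alt n
instance (n : Int) (out : String) : Decidable (Spec_beerRefrigerator n out) := by unfold Spec_beerRefrigerator; infer_instance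

-- ===== CLAIM (what is proved, stated in full; the proofs are below) =====
def Claim_equal_beerRefrigerator : Prop := ∀ (n : Int), Dom_beerRefrigerator n → Pre_beerRefrigerator n → Spec_beerRefrigerator n (beerRefrigerator n)

-- ===== LEMMAS AND PROOFS =====

-- the i-th inner candidate segment of A's list li
def pvSeg (n i : Int) : List (Int × Int × Int) :=
  ((PySem.List.pyRange i (PySem.Int.floordiv n i)).filter
      (fun j => PySem.Int.mod (PySem.Int.floordiv n i) j == 0)).map
    (fun j => (PySem.Int.floordiv (PySem.Int.floordiv n i) j, j, i))

-- A's list li, in order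
def pvLi (n : Int) : List (Int × Int × Int) :=
  ((PySem.List.pyRange 1 (PySem.Int.floordiv n 2)).filter
      (fun i => PySem.Int.mod n i == 0)).flatMap (pvSeg n)

-- min()'s fold step (first minimal element)
def pvStepA (st : Option (Int × Int × Int)) (x : Int × Int × Int) : Option (Int × Int × Int) :=
  match st with
  | none => some x
  | some m => if pvSurf x < pvSurf m then some x else some m

-- B's update, consuming a whole candidate
def pvStepB (st : Option ((Int × Int × Int) × Int)) (c : Int × Int × Int) :
    Option ((Int × Int × Int) × Int) :=
  pvUpdateB st c.1 c.2.1 c.2.2 (c.1 * c.2.1 + c.2.1 * c.2.2 + c.2.2 * c.1)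

theorem pvRange_pairwise (a b : Int) : (PySem.List.pyRange a b).Pairwise (· < ·) := by
  by_cases h : a < b
  · rw [PySem.List.pyRange_one_cons h]
    refine List.pairwise_cons.mpr ⟨?_, pvRange_pairwise (a + 1) b⟩
    intro x hx
    have := PySem.List.mem_pyRange_one.mp hx
    omega
  · have : PySem.List.pyRange a b = [] := by
      apply List.eq_nil_iff_forall_not_mem.mpr
      intro x hx
      have := PySem.List.mem_pyRange_one.mp hx
      omega
    simp [this]
termination_by (b - a).toNat
decreasing_by omega

-- two strictly increasing Int lists with the same members are equal
theorem pvEqOfMem {l₁ l₂ : List Int} (h₁ : l₁.Pairwise (· < ·)) (h₂ : l₂.Pairwise (· < ·))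
    (hm : ∀ x, x ∈ l₁ ↔ x ∈ l₂) : l₁ = l₂ :=
  PySem.List.eq_of_perm_of_pairwise_le_of_injective (fun x => x) (fun _ _ h => h)
    ((List.perm_ext_iff_of_nodup (h₁.imp ne_of_lt) (h₂.imp ne_of_lt)).mpr hm)
    (h₁.imp le_of_lt) (h₂.imp le_of_lt)

-- B's running min over a candidate stream is min() with the key attached
theorem pvMinFold (l : List (Int × Int × Int)) (o : Option (Int × Int × Int)) :
    l.foldl pvStepB (o.map fun c => (c, pvSurf c))
      = (l.foldl pvStepA o).map (fun c => (c, pvSurf c)) := by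
  induction l generalizing o with
  | nil => rfl
  | cons c t ih =>
      have hstep : pvStepB (o.map fun c => (c, pvSurf c)) c
          = (pvStepA o c).map (fun c => (c, pvSurf c)) := by
        cases o with
        | none => rfl
        | some m =>
            simp only [Option.map_some, pvStepB, pvStepA, pvUpdateB, pvSurf]
            split_ifs <;> rfl
      simp only [List.foldl_cons, hstep, ih]

theorem pvMin?_def (l : List (Int × Int × Int)) :
    PySem.List.min? l pvSurf = l.foldl pvStepA none := by
  unfold PySem.List.min? pvStepA
  congr 1
  funext acc x
  cases acc <;> rfl

-- the outer break loop is a fold over the divisors below half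
theorem pvOuter_eq (n half : Int) (divs is : List Int) (h : is.Pairwise (· ≤ ·))
    (st : Option ((Int × Int × Int) × Int)) :
    pvOuterB n half divs is st
      = (is.filter (fun i => !decide (half ≤ i))).foldl
          (fun st i => pvInnerB i (PySem.Int.floordiv n i) divs st) st := by
  induction is generalizing st with
  | nil => rfl
  | cons i rest ih =>
      have hrest : rest.Pairwise (· ≤ ·) := (List.pairwise_cons.mp h).2
      by_cases hb : half ≤ i
      · have hnil : rest.filter (fun x => !decide (half ≤ x)) = [] := by
          apply List.filter_eq_nil_iff.mpr
          intro x hx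
          have := (List.pairwise_cons.mp h).1 x hx
          simp only [Bool.not_eq_true', decide_eq_false_iff_not, not_not]
          omega
        simp [pvOuterB, hb, hnil]
      · simp [pvOuterB, hb, ih hrest]

-- the inner continue/break loop is a fold over the divisors in [i, temp)
theorem pvInner_eq (i temp : Int) (js : List Int) (h : js.Pairwise (· ≤ ·))
    (st : Option ((Int × Int × Int) × Int)) :
    pvInnerB i temp js st
      = (js.filter (fun j => !decide (j < i) && !decide (temp ≤ j))).foldl
          (fun st j =>
            if PySem.Int.mod temp j == 0 then
              pvUpdateB st (PySem.Int.floordiv temp j) j i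
                (PySem.Int.floordiv temp j * j + j * i + i * PySem.Int.floordiv temp j)
            else st) st := by
  induction js generalizing st with
  | nil => rfl
  | cons j rest ih =>
      have hrest : rest.Pairwise (· ≤ ·) := (List.pairwise_cons.mp h).2
      by_cases h1 : j < i
      · simp [pvInnerB, h1, ih hrest]
      · by_cases h2 : temp ≤ j
        · have hnil : rest.filter (fun x => !decide (x < i) && !decide (temp ≤ x)) = [] := by
            apply List.filter_eq_nil_iff.mpr
            intro x hx
            have := (List.pairwise_cons.mp h).1 x hx
            simp only [Bool.and_eq_true, Bool.not_eq_true', decide_eq_false_iff_not, not_and, not_not]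
            omega
          simp [pvInnerB, h1, h2, hnil]
        · by_cases h3 : PySem.Int.mod temp j = 0
          · simp [pvInnerB, h1, h2, h3, ih hrest]
          · simp [pvInnerB, h1, h2, h3, ih hrest]

-- the divisors of n below half, in order, are exactly A's outer loop hits
theorem pvOuterList (n : Int) :
    (((PySem.List.pyRange 1 (PySem.Int.floordiv n 2 + 1)).filter
        (fun d => PySem.Int.mod n d == 0)).filter
      (fun i => !decide (PySem.Int.floordiv n 2 ≤ i)))
      = (PySem.List.pyRange 1 (PySem.Int.floordiv n 2)).filter
          (fun i => PySem.Int.mod n i == 0) := by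
  apply pvEqOfMem
  · exact ((pvRange_pairwise _ _).filter _).filter _
  · exact (pvRange_pairwise _ _).filter _
  · intro x
    simp only [List.mem_filter, PySem.List.mem_pyRange_one, Bool.not_eq_true',
      decide_eq_false_iff_not, not_le, beq_iff_eq]
    constructor
    · rintro ⟨⟨⟨hx1, hx2⟩, hd⟩, hlt⟩
      exact ⟨⟨hx1, hlt⟩, hd⟩
    · rintro ⟨⟨hx1, hlt⟩, hd⟩
      exact ⟨⟨⟨hx1, by omega⟩, hd⟩, hlt⟩

-- the divisors of n in [i, temp) dividing temp are exactly A's inner loop hits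
theorem pvJlist (n i : Int) (hn : 4 ≤ n) (hi1 : 1 ≤ i) (hdvd : i ∣ n) :
    ((((PySem.List.pyRange 1 (PySem.Int.floordiv n 2 + 1)).filter
          (fun d => PySem.Int.mod n d == 0)).filter
        (fun j => !decide (j < i) && !decide (PySem.Int.floordiv n i ≤ j))).filter
      (fun j => PySem.Int.mod (PySem.Int.floordiv n i) j == 0))
      = (PySem.List.pyRange i (PySem.Int.floordiv n i)).filter
          (fun j => PySem.Int.mod (PySem.Int.floordiv n i) j == 0) := by
  obtain ⟨t, ht⟩ := hdvd
  have hi0 : 0 < i := by omega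
  have htemp : PySem.Int.floordiv n i = t := by
    rw [ht, PySem.Int.floordiv_eq_ediv_of_pos hi0, Int.mul_ediv_cancel_left t (by omega)]
  have ht0 : 0 < t := by nlinarith
  have htn : t ≤ n := by nlinarith
  apply pvEqOfMem
  · exact (((pvRange_pairwise _ _).filter _).filter _).filter _
  · exact (pvRange_pairwise _ _).filter _
  · intro x
    simp only [List.mem_filter, PySem.List.mem_pyRange_one, Bool.not_eq_true',
      decide_eq_false_iff_not, not_le, not_lt, beq_iff_eq, Bool.and_eq_true,
      PySem.Int.mod_eq_zero_iff_dvd, htemp]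
    have htdvd : t ∣ n := ⟨i, by rw [ht]; ring⟩
    constructor
    · intro h
      exact ⟨h.1.2, h.2⟩
    · intro h
      obtain ⟨⟨hxi, hxt⟩, hxd⟩ := h
      have hx0 : 0 < x := by omega
      -- x is a proper divisor of t, so 2*x ≤ t ≤ n, hence x ≤ n // 2
      obtain ⟨m, hm⟩ := id hxd
      have hm2 : 2 ≤ m := by nlinarith
      have hx2 : 2 * x ≤ t := by nlinarith
      have hhalf : x ≤ PySem.Int.floordiv n 2 := by
        rw [PySem.Int.le_floordiv_iff_mul_le (by omega)]
        omega
      exact ⟨⟨⟨⟨by omega, by omega⟩, hxd.trans htdvd⟩, ⟨hxi, hxt⟩⟩, hxd⟩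

-- per divisor i, B's inner loop folds B's step over A's i-th candidate segment
theorem pvInner_seg (n i : Int) (hn : 4 ≤ n) (hi1 : 1 ≤ i) (hdvd : i ∣ n)
    (st : Option ((Int × Int × Int) × Int)) :
    pvInnerB i (PySem.Int.floordiv n i)
        ((PySem.List.pyRange 1 (PySem.Int.floordiv n 2 + 1)).filter
          (fun d => PySem.Int.mod n d == 0)) st
      = (pvSeg n i).foldl pvStepB st := by
  rw [pvInner_eq _ _ _ ((pvRange_pairwise _ _).filter _ |>.imp le_of_lt)]
  rw [PySem.List.foldl_if_eq_foldl_filter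
    (p := fun j => PySem.Int.mod (PySem.Int.floordiv n i) j == 0)
    (f := fun st j =>
      pvUpdateB st (PySem.Int.floordiv (PySem.Int.floordiv n i) j) j i
        (PySem.Int.floordiv (PySem.Int.floordiv n i) j * j + j * i
          + i * PySem.Int.floordiv (PySem.Int.floordiv n i) j))]
  rw [pvJlist n i hn hi1 hdvd]
  rw [pvSeg, List.foldl_map]
  rfl

-- B's whole scan is the running min over A's candidate list
theorem pvB_state (n : Int) (hn : 4 ≤ n) :
    pvOuterB n (PySem.Int.floordiv n 2)
        ((PySem.List.pyRange 1 (PySem.Int.floordiv n 2 + 1)).filter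
          (fun d => PySem.Int.mod n d == 0))
        ((PySem.List.pyRange 1 (PySem.Int.floordiv n 2 + 1)).filter
          (fun d => PySem.Int.mod n d == 0)) none
      = (pvLi n).foldl pvStepB none := by
  rw [pvOuter_eq _ _ _ _ ((pvRange_pairwise _ _).filter _ |>.imp le_of_lt)]
  rw [pvOuterList n]
  rw [pvLi, List.foldl_flatMap]
  apply PySem.List.foldl_congr_mem
  intro st i hi
  have hi' := hi
  simp only [List.mem_filter, PySem.List.mem_pyRange_one, beq_iff_eq,
    PySem.Int.mod_eq_zero_iff_dvd] at hi'
  exact pvInner_seg n i hn hi'.1.1 hi'.2 st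

-- A's foldl-built list is pvLi
theorem pvA_li (n : Int) :
    ((PySem.List.pyRange 1 (PySem.Int.floordiv n 2)).foldl (fun li i =>
        let temp := PySem.Int.floordiv n i
        if PySem.Int.mod n i == 0 then
          (PySem.List.pyRange i temp).foldl (fun li j =>
            if PySem.Int.mod temp j == 0 then li ++ [(PySem.Int.floordiv temp j, j, i)] else li) li
        else li) ([] : List (Int × Int × Int))) = pvLi n := by
  simp only [PySem.List.foldl_append_if]
  rw [PySem.List.foldl_if_eq_foldl_filter
    (p := fun i => PySem.Int.mod n i == 0)
    (f := fun acc i => acc ++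
      ((PySem.List.pyRange i (PySem.Int.floordiv n i)).filter
          (fun j => PySem.Int.mod (PySem.Int.floordiv n i) j == 0)).map
        (fun j => (PySem.Int.floordiv (PySem.Int.floordiv n i) j, j, i)))]
  rw [PySem.List.foldl_append_eq_flatMap]
  rfl

-- descending sort of an Int list is the reverse of its ascending sort
theorem pvSortedRev (l : List Int) :
    PySem.List.sorted l (fun x => x) true = (PySem.List.sorted l (fun x => x)).reverse := by
  apply PySem.List.eq_of_perm_of_pairwise_le_of_injective (fun x : Int => -x) neg_injective
  · exact (PySem.List.sorted_perm l _ true).trans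
      ((PySem.List.sorted_perm l _ false).symm.trans (List.reverse_perm _).symm)
  · exact (PySem.List.sorted_pairwise_rev l _).imp (fun h => neg_le_neg h)
  · exact List.pairwise_reverse.mpr ((PySem.List.sorted_pairwise l _).imp (fun h => neg_le_neg h))

-- ===== VERDICT (by name: the statement is the Claim_ definition above) =====
theorem beerRefrigerator_spec : Claim_equal_beerRefrigerator := by
  intro n _ hpre
  unfold Spec_beerRefrigerator
  have hn : 4 ≤ n := hpre
  unfold beerRefrigerator beerRefrigerator_alt
  simp only []
  rw [pvA_li, pvB_state n hn, pvMin?_def]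
  have hmap : List.foldl pvStepB none (pvLi n)
      = (List.foldl pvStepA none (pvLi n)).map (fun c => (c, pvSurf c)) := by
    simpa using pvMinFold (pvLi n) none
  rw [hmap]
  cases h : List.foldl pvStepA none (pvLi n) with
  | none => rfl
  | some best =>
      simp only [Option.map_some]
      rw [pvSortedRev [best.1, best.2.1, best.2.2]]
      have hlen : (PySem.List.sorted [best.1, best.2.1, best.2.2] (fun x => x)).reverse.length = 3 := by
        rw [List.length_reverse, (PySem.List.sorted_perm _ _ _).length_eq]
        rfl
      obtain ⟨x, y, z, hxyz⟩ := List.length_eq_three.mp hlen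
      rw [hxyz]
      simp [PySem.List.pyGetD_ofNat']
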